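-- pv_equiv track=rewrite | github.com/han-gaeul/TIL | Programmers/Lv.1/최소직사각형.py | solution
-- ===== SOURCE A (Python) =====
-- def solution(sizes):
--     width = []
--     height = []
--     for i in sizes:
--         if i[0] > i[1]:
--             width.append(i[0])
--             height.append(i[0])
--         else:
--             width.append(i[1])
--             height.append(i[1])
--     return max(width) * max(height)
-- ===== SOURCE B (Python) =====
-- def solution(sizes):
--     ordered = sorted(sizes, key=lambda p: p[0] if p[0] > p[1] else p[1])
--     last = ordered[-1]
--     m = last[0] if last[0] > last[1] else last[1]
--     return m * m
-- ===== Notes on version B (the rewrite author's own statement) =====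
-- stated objective: alternative
-- what changed: A builds two lists of each pair's larger side and multiplies their maxima; B instead sorts the rows by their larger side, picks the last row of the sorted order, and squares that row's larger side (sort-then-pick instead of list-building plus max passes).
import Mathlib
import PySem

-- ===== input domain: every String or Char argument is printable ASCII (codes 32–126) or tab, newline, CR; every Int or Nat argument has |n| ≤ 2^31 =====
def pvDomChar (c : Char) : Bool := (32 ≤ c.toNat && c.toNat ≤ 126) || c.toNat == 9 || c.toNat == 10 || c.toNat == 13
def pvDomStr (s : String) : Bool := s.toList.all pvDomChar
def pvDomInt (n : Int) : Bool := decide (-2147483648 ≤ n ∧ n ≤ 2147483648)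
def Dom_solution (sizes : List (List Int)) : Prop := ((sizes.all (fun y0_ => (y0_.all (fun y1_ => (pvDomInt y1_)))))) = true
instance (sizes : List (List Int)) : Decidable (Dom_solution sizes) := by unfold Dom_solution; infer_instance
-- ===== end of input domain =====

-- B replaces A's two appended lists + two max passes by a sort of the rows keyed on each
-- pair's larger side, picking the last row of the sorted order and squaring its larger side.
-- ===== PORT A =====
def solution (sizes : List (List Int)) : Int :=
  let wh : List Int × List Int := sizes.foldl (fun acc i =>
    let a := PySem.List.pyGetD i 0 0
    let b := PySem.List.pyGetD i 1 0
    if a > b then (acc.1 ++ [a], acc.2 ++ [a]) else (acc.1 ++ [b], acc.2 ++ [b])) ([], [])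
  ((PySem.List.max? wh.1 (fun x => x)).getD 0) * ((PySem.List.max? wh.2 (fun x => x)).getD 0)

-- ===== PORT B =====
def solution_alt (sizes : List (List Int)) : Int :=
  let ordered := PySem.List.sorted sizes (fun p =>
    if PySem.List.pyGetD p 0 0 > PySem.List.pyGetD p 1 0
    then PySem.List.pyGetD p 0 0 else PySem.List.pyGetD p 1 0) false
  let last := PySem.List.pyGetD ordered (-1) []
  let m := if PySem.List.pyGetD last 0 0 > PySem.List.pyGetD last 1 0
           then PySem.List.pyGetD last 0 0 else PySem.List.pyGetD last 1 0
  m * m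

-- ===== PRECONDITION & SPEC =====
-- Pre_ excludes exactly the inputs where A raises: the empty list (max of empty → ValueError)
-- and rows with fewer than 2 elements (IndexError).
def Pre_solution (sizes : List (List Int)) : Prop :=
  sizes ≠ [] ∧ ∀ p ∈ sizes, 2 ≤ p.length
instance (sizes : List (List Int)) : Decidable (Pre_solution sizes) := by unfold Pre_solution; infer_instance
def pvWitness_solution : List (List Int) := [[3, 1], [2, 5]]
def Spec_solution (sizes : List (List Int)) (out : Int) : Prop := out = solution_alt sizes
instance (sizes : List (List Int)) (out : Int) : Decidable (Spec_solution sizes out) := by unfold Spec_solution; infer_instance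

-- ===== CLAIM (what is proved, stated in full; the proofs are below) =====
def Claim_equal_solution : Prop := ∀ (sizes : List (List Int)), Dom_solution sizes → Pre_solution sizes → Spec_solution sizes (solution sizes)

-- ===== LEMMAS AND PROOFS =====
-- the key: the larger of a row's first two entries
def rowMax (p : List Int) : Int :=
  if PySem.List.pyGetD p 0 0 > PySem.List.pyGetD p 1 0
  then PySem.List.pyGetD p 0 0 else PySem.List.pyGetD p 1 0

theorem fold_eq (sizes : List (List Int)) (acc : List Int × List Int) :
    sizes.foldl (fun acc i =>
      let a := PySem.List.pyGetD i 0 0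
      let b := PySem.List.pyGetD i 1 0
      if a > b then (acc.1 ++ [a], acc.2 ++ [a]) else (acc.1 ++ [b], acc.2 ++ [b])) acc
    = (acc.1 ++ sizes.map rowMax, acc.2 ++ sizes.map rowMax) := by
  induction sizes generalizing acc with
  | nil => simp
  | cons p t ih =>
    simp only [List.foldl_cons, List.map_cons]
    rw [ih]
    by_cases h : (PySem.List.pyGetD p 0 0) > (PySem.List.pyGetD p 1 0) <;>
      simp [h, rowMax, List.append_assoc]

-- rowMax of the last row of the sorted order is the maximum key over the whole list
theorem rowMax_last_sorted (sizes : List (List Int)) (h : sizes ≠ []) :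
    ∀ y ∈ sizes,
      rowMax y ≤ rowMax ((PySem.List.sorted sizes rowMax false).getLast
        (by simpa [PySem.List.sorted_eq_nil_iff] using h)) := by
  intro y hy
  set s := PySem.List.sorted sizes rowMax false with hs
  have hsne : s ≠ [] := by simpa [hs, PySem.List.sorted_eq_nil_iff] using h
  have hmem : y ∈ s := by
    rw [hs, PySem.List.mem_sorted]; exact hy
  obtain ⟨p, hp, hyp⟩ := List.getElem_of_mem hmem
  have hlast : s.getLast hsne = s[s.length - 1] := List.getLast_eq_getElem hsne
  rw [hlast, ← hyp]
  have hp' : p < s.length := hp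
  exact PySem.List.key_sorted_getElem_mono sizes rowMax (p := p) (q := s.length - 1)
    (by omega) (by simp only [hs, PySem.List.length_sorted] at hp' ⊢; omega)

theorem solution_spec : Claim_equal_solution := by
  intro sizes _ hpre
  obtain ⟨hne, -⟩ := hpre
  unfold Spec_solution solution solution_alt
  rw [fold_eq]
  simp only [List.nil_append]
  -- A's value: max of the mapped rowMax list
  obtain ⟨x, t, hxt⟩ := List.exists_cons_of_ne_nil (l := sizes.map rowMax) (by simpa using hne)
  rw [hxt, PySem.List.max?_id_cons]
  -- B's value: rowMax of last row of sorted
  have hsne : PySem.List.sorted sizes (fun p =>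
      if PySem.List.pyGetD p 0 0 > PySem.List.pyGetD p 1 0
      then PySem.List.pyGetD p 0 0 else PySem.List.pyGetD p 1 0) false ≠ [] := by
    simpa [PySem.List.sorted_eq_nil_iff] using hne
  rw [PySem.List.pyGetD_neg_one _ _ hsne]
  set L := (PySem.List.sorted sizes rowMax false).getLast
    (by simpa [PySem.List.sorted_eq_nil_iff] using hne) with hL
  have hLdef : (PySem.List.sorted sizes (fun p =>
      if PySem.List.pyGetD p 0 0 > PySem.List.pyGetD p 1 0
      then PySem.List.pyGetD p 0 0 else PySem.List.pyGetD p 1 0) false).getLast hsne = L := rfl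
  rw [hLdef]
  -- the foldl max equals rowMax L
  have hM := PySem.List.le_foldl_max t x
  have hmemM : t.foldl max x = x ∨ t.foldl max x ∈ t := PySem.List.foldl_max_mem t x
  have hLmem : L ∈ sizes := by
    have : L ∈ PySem.List.sorted sizes rowMax false := List.getLast_mem _
    rwa [PySem.List.mem_sorted] at this
  have hub : ∀ z ∈ sizes.map rowMax, z ≤ rowMax L := by
    intro z hz
    obtain ⟨y, hy, rfl⟩ := List.mem_map.mp hz
    exact rowMax_last_sorted sizes hne y hy
  have h1 : t.foldl max x ≤ rowMax L := by
    rcases hmemM with h | h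
    · rw [h]; exact hub x (by rw [hxt]; exact List.mem_cons_self)
    · exact hub _ (by rw [hxt]; exact List.mem_cons_of_mem _ h)
  have h2 : rowMax L ≤ t.foldl max x := by
    have : rowMax L ∈ sizes.map rowMax := List.mem_map_of_mem hLmem
    rw [hxt] at this
    rcases List.mem_cons.mp this with h | h
    · rw [h]; exact hM.1
    · exact (hM).2 _ h
  have heq : t.foldl max x = rowMax L := le_antisymm h1 h2
  simp only [Option.getD_some, heq, rowMax]

-- ===== VERDICT (by name: the statement is the Claim_ definition above) =====
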